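-- pv_equiv track=rewrite | github.com/WadeCappa/advent_of_code | 2023/day_9/solution.py | getRateOfChange
-- ===== SOURCE A (Python) =====
-- from functools import reduce
--
-- def getRateOfChange(sequence):
--     rateOfChange = []
--     for i in range(1, len(sequence)):
--         rateOfChange.append(sequence[i] - sequence[i - 1])
--
--     if reduce(lambda a, b: a + b, rateOfChange, 0) != 0:
--         deeperRateOfChange = getRateOfChange(rateOfChange)
--         rateOfChange.append(rateOfChange[-1] + deeperRateOfChange[-1])
--
--     return rateOfChange
-- ===== SOURCE B (Python) =====
-- def getRateOfChange(sequence):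
--     d = [sequence[i] - sequence[i - 1] for i in range(1, len(sequence))]
--     if sum(d) != 0:
--         total = 0
--         c = d
--         while sum(c) != 0:
--             total += c[-1]
--             c = [c[i] - c[i - 1] for i in range(1, len(c))]
--         total += c[-1]
--         d.append(total)
--     return d
-- ===== Notes on version B (the rewrite author's own statement) =====
-- stated objective: alternative
-- what changed: Replaces A's recursion over difference lists (each level appending its extrapolated term) with an explicit while loop that accumulates the sum of each level's last element into a scalar total, appended once at the end.
import Mathlib
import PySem

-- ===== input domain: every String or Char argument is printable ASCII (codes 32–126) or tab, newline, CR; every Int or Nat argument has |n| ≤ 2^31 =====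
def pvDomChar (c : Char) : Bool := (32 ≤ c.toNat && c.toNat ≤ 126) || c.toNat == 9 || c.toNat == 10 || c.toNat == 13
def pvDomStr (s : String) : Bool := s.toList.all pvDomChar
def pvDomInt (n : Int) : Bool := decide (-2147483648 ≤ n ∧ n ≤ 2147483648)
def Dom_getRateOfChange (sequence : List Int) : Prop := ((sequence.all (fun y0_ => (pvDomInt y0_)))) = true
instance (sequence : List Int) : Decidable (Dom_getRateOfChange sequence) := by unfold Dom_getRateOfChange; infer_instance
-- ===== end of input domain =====

-- B replaces A's recursion over difference lists with a while loop accumulating each level's last element into one scalar (alternative decomposition, same cost).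


-- ===== PORT A =====
-- the 'for i in range(1, len(sequence)): rateOfChange.append(sequence[i] - sequence[i-1])' loop, shared verbatim by both Pythons
def pvDiff (xs : List Int) : List Int :=
  (PySem.List.pyRange 1 (xs.length : Int) 1).foldl
    (fun acc i => acc ++ [PySem.List.pyGetD xs i 0 - PySem.List.pyGetD xs (i - 1) 0]) []

theorem pvDiff_length (xs : List Int) : (pvDiff xs).length = xs.length - 1 := by
  unfold pvDiff
  rw [PySem.List.foldl_append_singleton_eq_map]
  simp [PySem.List.length_pyRange_one]

theorem pvDiff_lt (xs : List Int) (h : ¬ (pvDiff xs).foldl (· + ·) 0 = 0) :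
    (pvDiff xs).length < xs.length := by
  have hl := pvDiff_length xs
  have hne : pvDiff xs ≠ [] := by intro he; rw [he] at h; simp at h
  have := List.length_pos_of_ne_nil hne
  omega

-- rateOfChange[-1] / deeperRateOfChange[-1]; default 0 is unreachable inside Pre_
def getRateOfChange (sequence : List Int) : List Int :=
  let rateOfChange := pvDiff sequence
  if h : rateOfChange.foldl (· + ·) 0 ≠ 0 then
    -- deeperRateOfChange = getRateOfChange(rateOfChange), inlined
    rateOfChange ++ [PySem.List.pyGetD rateOfChange (-1) 0 + PySem.List.pyGetD (getRateOfChange rateOfChange) (-1) 0]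
  else
    rateOfChange
termination_by sequence.length
decreasing_by exact pvDiff_lt sequence h

-- ===== PORT B =====
theorem pvDiff_lt_sum (c : List Int) (h : ¬ c.sum = 0) : (pvDiff c).length < c.length := by
  have hl := pvDiff_length c
  have hne : c ≠ [] := by intro he; rw [he] at h; simp at h
  have := List.length_pos_of_ne_nil hne
  omega

-- the 'while sum(c) != 0: total += c[-1]; c = diff(c)' loop followed by the final 'total += c[-1]'
def pvLoopB (c : List Int) (total : Int) : Int :=
  if h : c.sum ≠ 0 then
    pvLoopB (pvDiff c) (total + PySem.List.pyGetD c (-1) 0)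
  else
    total + PySem.List.pyGetD c (-1) 0
termination_by c.length
decreasing_by exact pvDiff_lt_sum c h

def getRateOfChange_alt (sequence : List Int) : List Int :=
  let d := pvDiff sequence
  if d.sum ≠ 0 then d ++ [pvLoopB d 0] else d

-- ===== PRECONDITION & SPEC =====
-- first-level difference of a list, used only to state Pre_ (independent of the ports)
def pvSeqDiff (xs : List Int) : List Int := List.zipWith (fun a b => b - a) xs xs.tail

-- Pre_ excludes exactly the inputs on which Python A raises IndexError: those of length ≥ 2 all of
-- whose iterated difference levels 1..n-1 have nonzero sum (the recursion then bottoms out asking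
-- for the last element of an empty difference list). Python B raises there too.
def Pre_getRateOfChange (sequence : List Int) : Prop :=
  sequence.length ≤ 1 ∨ ∃ k ∈ List.range sequence.length, 1 ≤ k ∧ (pvSeqDiff^[k] sequence).sum = 0
instance (sequence : List Int) : Decidable (Pre_getRateOfChange sequence) := by
  unfold Pre_getRateOfChange; infer_instance

def pvWitness_getRateOfChange : List Int := [1, 2, 3]

def Spec_getRateOfChange (sequence : List Int) (out : List Int) : Prop := out = getRateOfChange_alt sequence
instance (sequence : List Int) (out : List Int) : Decidable (Spec_getRateOfChange sequence out) := by unfold Spec_getRateOfChange; infer_instance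

-- ===== CLAIM (what is proved, stated in full; the proofs are below) =====
def Claim_equal_getRateOfChange : Prop := ∀ (sequence : List Int), Dom_getRateOfChange sequence → Pre_getRateOfChange sequence → Spec_getRateOfChange sequence (getRateOfChange sequence)

-- ===== LEMMAS AND PROOFS =====
theorem pvLoopB_acc (c : List Int) (t : Int) : pvLoopB c t = t + pvLoopB c 0 := by
  conv_lhs => rw [pvLoopB]
  conv_rhs => rw [pvLoopB]
  by_cases h : c.sum = 0
  · rw [dif_neg (not_not_intro h), dif_neg (not_not_intro h)]
    ring
  · rw [dif_pos h, dif_pos h,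
        pvLoopB_acc (pvDiff c) (t + PySem.List.pyGetD c (-1) 0),
        pvLoopB_acc (pvDiff c) (0 + PySem.List.pyGetD c (-1) 0)]
    ring
termination_by c.length
decreasing_by all_goals exact pvDiff_lt_sum c h

theorem last_getRateOfChange (xs : List Int) :
    PySem.List.pyGetD (getRateOfChange xs) (-1) 0 = pvLoopB (pvDiff xs) 0 := by
  rw [getRateOfChange]
  split
  · rename_i h
    have hs : (pvDiff xs).sum ≠ 0 := by simpa [List.sum_eq_foldl] using h
    rw [PySem.List.pyGetD_neg_one_append_singleton,
        last_getRateOfChange (pvDiff xs)]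
    conv_rhs => rw [pvLoopB]
    rw [dif_pos hs, pvLoopB_acc (pvDiff (pvDiff xs)) (0 + PySem.List.pyGetD (pvDiff xs) (-1) 0)]
    ring
  · rename_i h
    have hs : ¬ (pvDiff xs).sum ≠ 0 := by simpa [List.sum_eq_foldl] using h
    conv_rhs => rw [pvLoopB]
    rw [dif_neg hs]
    ring
termination_by xs.length
decreasing_by exact pvDiff_lt xs (by assumption)

theorem ports_agree (xs : List Int) : getRateOfChange xs = getRateOfChange_alt xs := by
  rw [getRateOfChange]
  unfold getRateOfChange_alt
  by_cases h : (pvDiff xs).foldl (· + ·) 0 = 0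
  · rw [dif_neg (not_not_intro h), if_neg (by simpa [List.sum_eq_foldl] using h)]
  · have hs : (pvDiff xs).sum ≠ 0 := by simpa [List.sum_eq_foldl] using h
    rw [dif_pos h, if_pos hs, last_getRateOfChange (pvDiff xs)]
    conv_rhs => rw [pvLoopB]
    rw [dif_pos hs, pvLoopB_acc (pvDiff (pvDiff xs)) (0 + PySem.List.pyGetD (pvDiff xs) (-1) 0)]
    simp

-- ===== VERDICT (by name: the statement is the Claim_ definition above) =====
theorem getRateOfChange_spec : Claim_equal_getRateOfChange := by
  intro sequence _ _
  unfold Spec_getRateOfChange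
  exact ports_agree sequence
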